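-- pv_equiv track=rewrite | github.com/Crespichou/Sleevy2 | Brouillon/Pattern.py | compute_cumulative_variability
-- ===== SOURCE A (Python) =====
-- def compute_cumulative_variability(data, mean):
--     cumulative_variability = []
--     current_variability = 0
--     for value in data:
--         if value is not None:
--             current_variability += abs(value - mean)
--             cumulative_variability.append(current_variability)
--     return cumulative_variability
-- ===== SOURCE B (Python) =====
-- def compute_cumulative_variability(data, mean):
--     # Back-to-front by suffix subtraction: the i-th cumulative value equals the
--     # grand total minus the deviations that come after position i, so we walk
--     # the deviations in reverse, emit the current remaining total, and subtract.
--     devs = [abs(v - mean) for v in data if v is not None]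
--     total = sum(devs)
--     out = []
--     for d in reversed(devs):
--         out.append(total)
--         total -= d
--     out.reverse()
--     return out
-- ===== Notes on version B (the rewrite author's own statement) =====
-- stated objective: alternative
-- what changed: Instead of accumulating a running prefix sum forward, B computes the grand total of absolute deviations once and builds the output back-to-front by subtracting each deviation from a running suffix total, then reverses.
import Mathlib
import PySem

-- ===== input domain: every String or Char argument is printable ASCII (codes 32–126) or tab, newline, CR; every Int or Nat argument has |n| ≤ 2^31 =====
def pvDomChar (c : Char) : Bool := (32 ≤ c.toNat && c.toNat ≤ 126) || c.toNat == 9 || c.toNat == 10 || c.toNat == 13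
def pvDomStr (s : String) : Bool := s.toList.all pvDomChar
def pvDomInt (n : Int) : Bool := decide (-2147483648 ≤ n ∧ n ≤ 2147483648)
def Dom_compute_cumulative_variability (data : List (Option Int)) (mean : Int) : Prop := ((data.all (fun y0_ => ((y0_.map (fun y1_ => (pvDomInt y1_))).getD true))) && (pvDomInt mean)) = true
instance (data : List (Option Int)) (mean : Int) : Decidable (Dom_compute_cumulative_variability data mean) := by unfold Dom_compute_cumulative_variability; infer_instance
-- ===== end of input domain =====

-- B replaces A's forward running-prefix-sum loop by total-then-suffix-subtraction built back-to-front; return values are identical.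

-- ===== PORT A =====
-- A: one fused loop carrying (cumulative list, running total), appending on each non-None value.
def compute_cumulative_variability (data : List (Option Int)) (mean : Int) : List Int :=
  (data.foldl
    (fun (st : List Int × Int) value =>
      match value with
      | none => st
      | some v => (st.1 ++ [st.2 + |v - mean|], st.2 + |v - mean|))
    ([], 0)).1

-- ===== PORT B =====
-- B: deviation list, grand total, then reverse walk emitting the remaining suffix total, reversed at the end.
def compute_cumulative_variability_alt (data : List (Option Int)) (mean : Int) : List Int :=
  let devs := data.filterMap (fun v => v.map (fun x => |x - mean|))
  let st := devs.reverse.foldl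
    (fun (st : List Int × Int) d => (st.1 ++ [st.2], st.2 - d))
    ([], devs.sum)
  st.1.reverse

-- ===== PRECONDITION & SPEC =====
def Spec_compute_cumulative_variability (data : List (Option Int)) (mean : Int) (out : List Int) : Prop := out = compute_cumulative_variability_alt data mean
instance (data : List (Option Int)) (mean : Int) (out : List Int) : Decidable (Spec_compute_cumulative_variability data mean out) := by unfold Spec_compute_cumulative_variability; infer_instance

-- ===== CLAIM (what is proved, stated in full; the proofs are below) =====
def Claim_equal_compute_cumulative_variability : Prop := ∀ (data : List (Option Int)) (mean : Int), Dom_compute_cumulative_variability data mean → Spec_compute_cumulative_variability data mean (compute_cumulative_variability data mean)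

-- ===== LEMMAS AND PROOFS =====

-- reference: forward prefix sums (proof-only helper; neither port uses it)
def pvAccum (s : Int) : List Int → List Int
  | [] => []
  | d :: ds => (s + d) :: pvAccum (s + d) ds

-- reference: descending remaining totals (proof-only helper)
def pvDesc (t : Int) : List Int → List Int
  | [] => []
  | d :: ds => t :: pvDesc (t - d) ds

theorem pv_fold_accum (mean : Int) (data : List (Option Int)) (acc : List Int) (s : Int) :
    (data.foldl
      (fun (st : List Int × Int) value =>
        match value with
        | none => st
        | some v => (st.1 ++ [st.2 + |v - mean|], st.2 + |v - mean|))
      (acc, s)).1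
    = acc ++ pvAccum s (data.filterMap (fun v => v.map (fun x => |x - mean|))) := by
  induction data generalizing acc s with
  | nil => simp [pvAccum]
  | cons hd tl ih =>
    cases hd with
    | none => simpa using ih acc s
    | some v =>
      simp only [List.foldl_cons, List.filterMap_cons, Option.map_some]
      rw [ih]
      simp [pvAccum]

theorem pv_fold_desc (rds : List Int) (acc : List Int) (t : Int) :
    (rds.foldl (fun (st : List Int × Int) d => (st.1 ++ [st.2], st.2 - d)) (acc, t)).1
      = acc ++ pvDesc t rds := by
  induction rds generalizing acc t with
  | nil => simp [pvDesc]
  | cons d ds ih =>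
    simp only [List.foldl_cons]
    rw [ih]
    simp [pvDesc]

theorem pvDesc_append (xs ys : List Int) (t : Int) :
    pvDesc t (xs ++ ys) = pvDesc t xs ++ pvDesc (t - xs.sum) ys := by
  induction xs generalizing t with
  | nil => simp [pvDesc]
  | cons x xs ih => simp [pvDesc, ih, sub_sub]

theorem pvDesc_reverse (devs : List Int) (s : Int) :
    pvDesc (s + devs.sum) devs.reverse = (pvAccum s devs).reverse := by
  induction devs generalizing s with
  | nil => simp [pvDesc, pvAccum]
  | cons d ds ih =>
    have h : (d :: ds).reverse = ds.reverse ++ [d] := by simp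
    rw [h, pvDesc_append, pvAccum]
    have hsum : (d :: ds).sum = d + ds.sum := by simp
    rw [hsum]
    have h1 : s + (d + ds.sum) = (s + d) + ds.sum := by ring
    rw [h1, ih (s + d)]
    have h2 : s + d + ds.sum - ds.reverse.sum = s + d := by simp
    rw [h2]
    simp [pvDesc]

-- ===== VERDICT (by name: the statement is the Claim_ definition above) =====
theorem compute_cumulative_variability_spec : Claim_equal_compute_cumulative_variability := by
  intro data mean _
  unfold Spec_compute_cumulative_variability compute_cumulative_variability
  rw [pv_fold_accum mean data [] 0]
  have halt : compute_cumulative_variability_alt data mean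
      = ((List.foldl (fun (st : List Int × Int) d => (st.1 ++ [st.2], st.2 - d))
          (([] : List Int), (data.filterMap (fun v => v.map (fun x => |x - mean|))).sum)
          (data.filterMap (fun v => v.map (fun x => |x - mean|))).reverse).1).reverse := rfl
  rw [halt, pv_fold_desc]
  have := pvDesc_reverse (data.filterMap (fun v => v.map (fun x => |x - mean|))) 0
  rw [zero_add] at this
  simp [this]
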